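-- pv_equiv track=rewrite | github.com/AshwathyTR/Emotion-Modelling | spacy_nlp.py | get_quotes
-- ===== SOURCE A (Python) =====
-- def get_quotes(text):
--     quotes={}
--     inquote=False
--     quote=""
--     qnum=1
--     txt=""
--     for char in text:
--         if inquote and char!='\"':
--             quote=quote+char
--         elif(char!='\"'):
--             txt=txt+char
--         if(char == '\"' and inquote==False):
--             inquote=True
--             quote=""
--         elif(char == '\"' and inquote==True):
--             quotes[qnum]=quote
--             inquote=False
--             txt= txt+" q"+str(qnum)+". "
--             qnum=qnum+1
--     return txt, quotes
-- ===== SOURCE B (Python) =====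
-- def get_quotes(text):
--     first, *rest = text.split('"')
--     quotes = {}
--     txt = first
--     qnum = 1
--     while len(rest) >= 2:
--         body, after, *rest = rest
--         quotes[qnum] = body
--         txt += ' q' + str(qnum) + '. ' + after
--         qnum += 1
--     return txt, quotes
-- ===== Notes on version B (the rewrite author's own statement) =====
-- stated objective: idiomatic
-- what changed: Replaces A's character-by-character inquote state machine by splitting the text on the quote character once and consuming the resulting segments two at a time (quote body, following text), a trailing unclosed segment being dropped by the loop guard.
import Mathlib
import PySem

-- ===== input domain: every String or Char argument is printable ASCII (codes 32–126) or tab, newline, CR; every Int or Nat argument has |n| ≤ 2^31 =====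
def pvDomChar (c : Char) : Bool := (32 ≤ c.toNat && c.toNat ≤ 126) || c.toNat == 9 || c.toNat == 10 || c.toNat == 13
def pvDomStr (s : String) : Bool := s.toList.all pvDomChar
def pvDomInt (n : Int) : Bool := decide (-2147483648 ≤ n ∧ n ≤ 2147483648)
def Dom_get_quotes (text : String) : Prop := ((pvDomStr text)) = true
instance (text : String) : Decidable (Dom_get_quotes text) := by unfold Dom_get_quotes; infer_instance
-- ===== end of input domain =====

-- B replaces A's char-by-char inquote state machine by split-on-'"' followed by pairwise
-- consumption of the segments (objective: simpler/idiomatic; same return value, including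
-- dropping a trailing unclosed quote).

-- ===== PORT A =====
-- A's loop state: (quotes, inquote, quote, qnum, txt); strings carried as List Char.
def pvStepA (st : PySem.Dict Int String × Bool × List Char × Int × List Char) (c : Char) :
    PySem.Dict Int String × Bool × List Char × Int × List Char :=
  let (quotes, inquote, quote, qnum, txt) := st
  -- first if/elif: accumulate into quote or txt
  let quote' := if inquote = true ∧ c ≠ '"' then quote ++ [c] else quote
  let txt' := if ¬ (inquote = true ∧ c ≠ '"') ∧ c ≠ '"' then txt ++ [c] else txt
  -- second if/elif: toggle quote state
  if c = '"' ∧ inquote = false then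
    (quotes, true, [], qnum, txt')
  else if c = '"' ∧ inquote = true then
    (quotes.insert qnum (String.ofList quote'), false, quote', qnum + 1,
      txt' ++ (" q".toList ++ PySem.Int.toChars qnum ++ ". ".toList))
  else
    (quotes, inquote, quote', qnum, txt')

def get_quotes (text : String) : String × (List (Int × String)) :=
  let st := text.toList.foldl pvStepA (PySem.Dict.empty, false, [], 1, [])
  (String.ofList st.2.2.2.2, st.1.items)

-- ===== PORT B =====
-- B's while loop: consume the split segments two at a time (quote body, following text).
def pvAltGo (parts : List (List Char)) (qnum : Int) (quotes : PySem.Dict Int String)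
    (txt : List Char) : List Char × PySem.Dict Int String :=
  match parts with
  | body :: after :: rest =>
      pvAltGo rest (qnum + 1) (quotes.insert qnum (String.ofList body))
        (txt ++ (" q".toList ++ PySem.Int.toChars qnum ++ ". ".toList) ++ after)
  | _ => (txt, quotes)

def get_quotes_alt (text : String) : String × (List (Int × String)) :=
  match text.toList.splitOn '"' with
  | first :: rest =>
      let r := pvAltGo rest 1 PySem.Dict.empty first
      (String.ofList r.1, r.2.items)
  | [] => ("", [])   -- unreachable: splitOn never returns []

-- ===== PRECONDITION & SPEC =====
def Spec_get_quotes (text : String) (out : String × (List (Int × String))) : Prop := out = get_quotes_alt text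
instance (text : String) (out : String × (List (Int × String))) : Decidable (Spec_get_quotes text out) := by unfold Spec_get_quotes; infer_instance

-- ===== CLAIM (what is proved, stated in full; the proofs are below) =====
def Claim_equal_get_quotes : Prop := ∀ (text : String), Dom_get_quotes text → Spec_get_quotes text (get_quotes text)

-- ===== LEMMAS AND PROOFS =====

-- projection of A's loop state to the observable pair (txt, quotes)
def pvTD (st : PySem.Dict Int String × Bool × List Char × Int × List Char) :
    List Char × PySem.Dict Int String := (st.2.2.2.2, st.1)

lemma pv_splitOn_ne_nil (cs : List Char) : cs.splitOn '"' ≠ [] := by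
  simp [List.splitOn]
  exact List.splitOnP_ne_nil _ cs

-- The key invariant: A's fold from either mode equals B's pairwise consumption of the split.
lemma pv_key (cs : List Char) : ∀ (d : PySem.Dict Int String) (qnum : Int)
    (q0 txt : List Char) (inq : Bool) (first : List Char) (rest : List (List Char)),
    cs.splitOn '"' = first :: rest →
    pvTD (cs.foldl pvStepA (d, inq, q0, qnum, txt)) =
      (if inq then pvAltGo ((q0 ++ first) :: rest) qnum d txt
       else pvAltGo rest qnum d (txt ++ first)) := by
  induction cs with
  | nil =>
      intro d qnum q0 txt inq first rest h
      simp [List.splitOn, List.splitOnP_nil] at h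
      obtain ⟨h1, h2⟩ := h
      subst h1; subst h2
      cases inq <;> simp [pvAltGo, pvTD]
  | cons c cs ih =>
      intro d qnum q0 txt inq first rest h
      by_cases hc : c = '"'
      · subst hc
        rw [show ('"' :: cs).splitOn '"' = [] :: cs.splitOn '"' by
              simp [List.splitOn, List.splitOnP_cons]] at h
        obtain ⟨h1, h2⟩ : first = [] ∧ cs.splitOn '"' = rest := by
          cases h; exact ⟨rfl, rfl⟩
        subst h1
        obtain ⟨f', r', hr⟩ : ∃ f' r', rest = f' :: r' := by
          cases hrest : rest with
          | nil => exact absurd (h2.trans hrest) (pv_splitOn_ne_nil cs)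
          | cons a b => exact ⟨a, b, rfl⟩
        subst hr
        cases inq with
        | false =>
            simp only [List.foldl_cons]
            rw [show pvStepA (d, false, q0, qnum, txt) '"' = (d, true, [], qnum, txt) by
                  simp [pvStepA]]
            rw [ih d qnum [] txt true f' r' h2]
            simp [pvAltGo]
        | true =>
            simp only [List.foldl_cons]
            rw [show pvStepA (d, true, q0, qnum, txt) '"'
                  = (d.insert qnum (String.ofList q0), false, q0, qnum + 1,
                      txt ++ (" q".toList ++ PySem.Int.toChars qnum ++ ". ".toList)) by
                  simp [pvStepA]]
            rw [ih (d.insert qnum (String.ofList q0)) (qnum + 1) q0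
                  (txt ++ (" q".toList ++ PySem.Int.toChars qnum ++ ". ".toList)) false f' r' h2]
            simp [pvAltGo]
      · rw [show (c :: cs).splitOn '"' = (cs.splitOn '"').modifyHead (List.cons c) by
              simp [List.splitOn, List.splitOnP_cons, hc]] at h
        obtain ⟨f', r', hsp⟩ : ∃ f' r', cs.splitOn '"' = f' :: r' := by
          cases hsp : cs.splitOn '"' with
          | nil => exact absurd hsp (pv_splitOn_ne_nil cs)
          | cons a b => exact ⟨a, b, rfl⟩
        rw [hsp] at h
        simp only [List.modifyHead] at h
        obtain ⟨h1, h2⟩ : first = c :: f' ∧ rest = r' := by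
          cases h; exact ⟨rfl, rfl⟩
        subst h1; subst h2
        cases inq with
        | false =>
            simp only [List.foldl_cons]
            rw [show pvStepA (d, false, q0, qnum, txt) c = (d, false, q0, qnum, txt ++ [c]) by
                  simp [pvStepA, hc]]
            rw [ih d qnum q0 (txt ++ [c]) false f' rest hsp]
            simp
        | true =>
            simp only [List.foldl_cons]
            rw [show pvStepA (d, true, q0, qnum, txt) c = (d, true, q0 ++ [c], qnum, txt) by
                  simp [pvStepA, hc]]
            rw [ih d qnum (q0 ++ [c]) txt true f' rest hsp]
            simp

-- ===== VERDICT (by name: the statement is the Claim_ definition above) =====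
theorem get_quotes_spec : Claim_equal_get_quotes := by
  intro text _
  unfold Spec_get_quotes get_quotes get_quotes_alt
  obtain ⟨first, rest, hsp⟩ : ∃ f r, text.toList.splitOn '"' = f :: r := by
    cases h : text.toList.splitOn '"' with
    | nil => exact absurd h (pv_splitOn_ne_nil _)
    | cons a b => exact ⟨a, b, rfl⟩
  have hk := pv_key text.toList PySem.Dict.empty 1 [] [] false first rest hsp
  simp only [if_neg (by simp : ¬ (false : Bool) = true)] at hk
  rw [hsp]
  simp only [pvTD] at hk
  have h1 : (text.toList.foldl pvStepA (PySem.Dict.empty, false, [], 1, [])).2.2.2.2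
      = (pvAltGo rest 1 PySem.Dict.empty ([] ++ first)).1 := congrArg Prod.fst hk
  have h2 : (text.toList.foldl pvStepA (PySem.Dict.empty, false, [], 1, [])).1
      = (pvAltGo rest 1 PySem.Dict.empty ([] ++ first)).2 := congrArg Prod.snd hk
  simp only [List.nil_append] at h1 h2
  simp only [h1, h2]
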